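-- pv_equiv track=rewrite | github.com/bgates747/AgonMaths | scripts/SoftFloat_find_deps.py | gather_deps
-- ===== SOURCE A (Python) =====
-- def gather_deps(start_file, graph, visited=None, level=0):
--     if visited is None:
--         visited = set()
--     if start_file in visited:
--         return []
--     visited.add(start_file)
--
--     results = [(start_file, level)]
--     for dep in graph.get(start_file, []):
--         results.extend(gather_deps(dep, graph, visited, level + 1))
--
--     return results
-- ===== SOURCE B (Python) =====
-- def gather_deps(start_file, graph, visited=None, level=0):
--     if visited is None:
--         visited = set()
--     results = []
--     stack = [(start_file, level)]
--     while stack: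
--         node, lvl = stack.pop()
--         if node in visited:
--             continue
--         visited.add(node)
--         results.append((node, lvl))
--         for child in reversed(graph.get(node, [])):
--             stack.append((child, lvl + 1))
--     return results
-- ===== Notes on version B (the rewrite author's own statement) =====
-- stated objective: alternative
-- what changed: Replaces A's recursive DFS (mutating a shared visited set across recursive calls) by an explicit-stack iterative DFS that marks nodes on pop and pushes children in reversed order, reproducing the same preorder and first-visit levels without recursion.
import Mathlib
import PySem

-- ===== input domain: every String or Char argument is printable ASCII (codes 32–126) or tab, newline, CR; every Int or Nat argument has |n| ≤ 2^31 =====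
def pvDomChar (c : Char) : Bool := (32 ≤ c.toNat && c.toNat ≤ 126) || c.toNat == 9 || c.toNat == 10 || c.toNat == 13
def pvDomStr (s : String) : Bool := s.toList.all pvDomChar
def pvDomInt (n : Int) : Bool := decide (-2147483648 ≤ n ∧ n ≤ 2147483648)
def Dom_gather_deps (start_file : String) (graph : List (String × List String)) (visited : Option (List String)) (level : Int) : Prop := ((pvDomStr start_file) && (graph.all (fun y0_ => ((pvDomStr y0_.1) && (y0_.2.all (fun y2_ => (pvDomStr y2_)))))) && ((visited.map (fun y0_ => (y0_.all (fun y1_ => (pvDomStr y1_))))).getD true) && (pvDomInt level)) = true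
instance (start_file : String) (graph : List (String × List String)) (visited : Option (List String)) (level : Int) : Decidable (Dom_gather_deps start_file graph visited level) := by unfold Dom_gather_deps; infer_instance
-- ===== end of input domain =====

-- B replaces A's recursive DFS by an explicit-stack iterative DFS (mark-on-pop, children
-- pushed reversed); same preorder result. Both mutate the caller's visited set identically;
-- the equivalence proved here is about the return value.

-- ===== PORT A =====
-- All nodes mentioned by the graph (keys and children); used only to size the fuel,
-- which is a totality guard for A's recursion (chain depth ≤ distinct nodes + 1).
def pvAllNodes (graph : List (String × List String)) : List String :=
  graph.flatMap (fun p => p.1 :: p.2)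

mutual
  -- gather_deps body: returns (results, visited-after) — Python mutates `visited` in place.
  def pvGoA (graph : List (String × List String)) :
      Nat → String → List String → Int → List (String × Int) × List String
    | 0, _, v, _ => ([], v)          -- fuel exhausted: unreachable for the fuel chosen below
    | Nat.succ f, n, v, l =>
      if n ∈ v then ([], v)
      else
        let v1 := PySem.Set.add v n
        let p := pvGoAList graph f (PySem.Dict.getD (PySem.Dict.mk graph) n []) v1 (l + 1)
        ((n, l) :: p.1, p.2)
  termination_by f _ _ _ => (f, 0, (0:Nat))
  -- the `for dep in graph.get(...)` loop of A, extending results and threading visited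
  def pvGoAList (graph : List (String × List String)) :
      Nat → List String → List String → Int → List (String × Int) × List String
    | _, [], v, _ => ([], v)
    | f, d :: ds, v, l =>
      let p1 := pvGoA graph f d v l
      let p2 := pvGoAList graph f ds p1.2 l
      (p1.1 ++ p2.1, p2.2)
  termination_by f ds _ _ => (f, 1, ds.length)
end

def gather_deps (start_file : String) (graph : List (String × List String)) (visited : Option (List String)) (level : Int) : List (String × Int) :=
  let v0 := match visited with | none => ([] : List String) | some s => s
  (pvGoA graph ((pvAllNodes graph).length + 1) start_file v0 level).1

-- ===== PORT B =====
-- number of graph-mentioned nodes not yet visited (termination measure of the while loop)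
def pvUc (graph : List (String × List String)) (v : List String) : Nat :=
  ((pvAllNodes graph).filter (fun x => !(v.contains x))).length

theorem pvUc_lt_of_mem (graph : List (String × List String)) (v : List String) (n : String)
    (hmem : n ∈ pvAllNodes graph) (hnv : n ∉ v) :
    pvUc graph (v ++ [n]) < pvUc graph v := by
  unfold pvUc
  have hsub : List.Sublist ((pvAllNodes graph).filter (fun x => !((v ++ [n]).contains x)))
      ((pvAllNodes graph).filter (fun x => !(v.contains x))) :=
    List.monotone_filter_right _ (by
      intro a h
      simp only [Bool.not_eq_true', List.contains_eq_mem, decide_eq_false_iff_not,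
        List.mem_append, not_or] at h ⊢
      exact h.1)
  refine Nat.lt_of_le_of_ne hsub.length_le (fun hlen => ?_)
  have heq := hsub.eq_of_length hlen
  have h1 : n ∈ (pvAllNodes graph).filter (fun x => !(v.contains x)) := by
    simp [List.mem_filter, hmem, hnv]
  have h2 : n ∉ (pvAllNodes graph).filter (fun x => !((v ++ [n]).contains x)) := by
    simp [List.mem_filter]
  exact h2 (heq ▸ h1)

theorem pvGetD_nil_of_not_mem (graph : List (String × List String)) (n : String)
    (h : n ∉ pvAllNodes graph) : PySem.Dict.getD (PySem.Dict.mk graph) n [] = [] := by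
  induction graph with
  | nil => rfl
  | cons p rest ih =>
    have hn : n ≠ p.1 := by
      intro he; exact h (by simp [pvAllNodes, he])
    have hrest : n ∉ pvAllNodes rest := by
      intro hm
      exact h (by simp only [pvAllNodes, List.mem_flatMap] at hm ⊢
                  obtain ⟨q, hq, hq2⟩ := hm
                  exact ⟨q, List.mem_cons_of_mem _ hq, hq2⟩)
    have hg : PySem.Dict.get? (PySem.Dict.mk (p :: rest)) n
        = PySem.Dict.get? (PySem.Dict.mk rest) n := by
      rw [show (PySem.Dict.mk (p :: rest)) = PySem.Dict.mk ((p.1, p.2) :: rest) by simp,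
        PySem.Dict.get?_mk_cons]
      simp [show (p.1 == n) = false by simp [hn.symm]]
    rw [PySem.Dict.getD_eq_get?_getD, hg, ← PySem.Dict.getD_eq_get?_getD]
    exact ih hrest

-- the iterative DFS loop of Source B: stack (top = head), visited, accumulated results
def pvGoB (graph : List (String × List String)) :
    List (String × Int) → List String → List (String × Int) → List (String × Int)
  | [], _, res => res
  | (n, l) :: rest, v, res =>
    if h : n ∈ v then pvGoB graph rest v res
    else
      pvGoB graph
        ((PySem.Dict.getD (PySem.Dict.mk graph) n []).reverse.foldl
          (fun st c => (c, l + 1) :: st) rest)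
        (PySem.Set.add v n) (res ++ [(n, l)])
termination_by stack v _ => (pvUc graph v, stack.length)
decreasing_by
  · exact Prod.Lex.right _ (Nat.lt_succ_self _)
  · by_cases hmem : n ∈ pvAllNodes graph
    · apply Prod.Lex.left
      have : PySem.Set.add v n = v ++ [n] := by
        simp [PySem.Set.add, PySem.Set.contains, List.contains_eq_mem, h]
      rw [this]; exact pvUc_lt_of_mem graph v n hmem h
    · have hnil := pvGetD_nil_of_not_mem graph n hmem
      rw [hnil]
      have hv : PySem.Set.add v n = v ++ [n] := by
        simp [PySem.Set.add, PySem.Set.contains, List.contains_eq_mem, h]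
      rw [hv]
      have huc : pvUc graph (v ++ [n]) = pvUc graph v := by
        unfold pvUc
        congr 1
        refine List.filter_congr ?_
        intro a ha
        have hne : a ≠ n := fun he => hmem (he ▸ ha)
        simp [List.contains_eq_mem, hne]
      rw [huc]
      exact Prod.Lex.right _ (Nat.lt_succ_self _)

def gather_deps_alt (start_file : String) (graph : List (String × List String)) (visited : Option (List String)) (level : Int) : List (String × Int) :=
  let v0 := match visited with | none => ([] : List String) | some s => s
  pvGoB graph [(start_file, level)] v0 []

-- ===== PRECONDITION & SPEC =====
def Spec_gather_deps (start_file : String) (graph : List (String × List String)) (visited : Option (List String)) (level : Int) (out : List (String × Int)) : Prop := out = gather_deps_alt start_file graph visited level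
instance (start_file : String) (graph : List (String × List String)) (visited : Option (List String)) (level : Int) (out : List (String × Int)) : Decidable (Spec_gather_deps start_file graph visited level out) := by unfold Spec_gather_deps; infer_instance

-- ===== CLAIM (what is proved, stated in full; the proofs are below) =====
def Claim_equal_gather_deps : Prop := ∀ (start_file : String) (graph : List (String × List String)) (visited : Option (List String)) (level : Int), Dom_gather_deps start_file graph visited level → Spec_gather_deps start_file graph visited level (gather_deps start_file graph visited level)

-- ===== LEMMAS AND PROOFS =====

theorem pvUc_le_of_append (graph : List (String × List String)) (v w : List String) :
    pvUc graph (v ++ w) ≤ pvUc graph v := by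
  unfold pvUc
  exact (List.monotone_filter_right _ (by
    intro a h
    simp only [Bool.not_eq_true', List.contains_eq_mem, decide_eq_false_iff_not,
      List.mem_append, not_or] at h ⊢
    exact h.1)).length_le

theorem pvAdd_not_mem (v : List String) (n : String) (h : n ∉ v) :
    PySem.Set.add v n = v ++ [n] := by
  simp [PySem.Set.add, PySem.Set.contains, List.contains_eq_mem, h]

theorem pvRevPush (ds : List String) (l : Int) (rest : List (String × Int)) :
    ds.reverse.foldl (fun st c => (c, l) :: st) rest
      = ds.map (fun d => (d, l)) ++ rest := by
  rw [List.foldl_reverse]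
  induction ds with
  | nil => rfl
  | cons d ds ih => simp [List.foldr_cons, ih]

theorem pvKey_of_getD_ne_nil (graph : List (String × List String)) (n : String)
    (h : PySem.Dict.getD (PySem.Dict.mk graph) n [] ≠ []) : n ∈ pvAllNodes graph := by
  by_contra hmem
  exact h (pvGetD_nil_of_not_mem graph n hmem)

-- the visited set only grows: A's result visited is the input visited plus a suffix
theorem pvGoA_prefix (g : List (String × List String)) : ∀ f : Nat,
    (∀ (n : String) (v : List String) (l : Int), ∃ w, (pvGoA g f n v l).2 = v ++ w)
    ∧ (∀ (ds : List String) (v : List String) (l : Int), ∃ w, (pvGoAList g f ds v l).2 = v ++ w) := by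
  intro f
  induction f with
  | zero =>
    constructor
    · intro n v l; exact ⟨[], by simp [pvGoA]⟩
    · intro ds
      induction ds with
      | nil => intro v l; exact ⟨[], by simp [pvGoAList]⟩
      | cons d ds ih =>
        intro v l
        obtain ⟨w2, hw2⟩ := ih v l
        exact ⟨w2, by simpa [pvGoAList, pvGoA] using hw2⟩
  | succ f ih =>
    have hA : ∀ (n : String) (v : List String) (l : Int), ∃ w, (pvGoA g (f+1) n v l).2 = v ++ w := by
      intro n v l
      by_cases hv : n ∈ v
      · exact ⟨[], by simp [pvGoA, hv]⟩
      · obtain ⟨w, hw⟩ := ih.2 (PySem.Dict.getD (PySem.Dict.mk g) n []) (PySem.Set.add v n) (l + 1)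
        refine ⟨[n] ++ w, ?_⟩
        simp only [pvGoA, hv, if_false]
        rw [hw, pvAdd_not_mem v n hv, List.append_assoc]
    refine ⟨hA, ?_⟩
    intro ds
    induction ds with
    | nil => intro v l; exact ⟨[], by simp [pvGoAList]⟩
    | cons d ds ihds =>
      intro v l
      obtain ⟨w1, hw1⟩ := hA d v l
      obtain ⟨w2, hw2⟩ := ihds ((pvGoA g (f+1) d v l).2) l
      refine ⟨w1 ++ w2, ?_⟩
      simp only [pvGoAList]
      rw [hw2, hw1, List.append_assoc]

theorem pvUc_prefix_le (g : List (String × List String)) {v v2 : List String}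
    (h : ∃ w, v2 = v ++ w) : pvUc g v2 ≤ pvUc g v := by
  obtain ⟨w, rfl⟩ := h
  exact pvUc_le_of_append g v w

-- MAIN: running B's loop on a popped node is A's recursive call threaded through
theorem pvMain (g : List (String × List String)) : ∀ f : Nat,
    (∀ (n : String) (v : List String) (l : Int) (rest : List (String × Int)) (res : List (String × Int)),
      pvUc g v < f →
      pvGoB g ((n, l) :: rest) v res
        = pvGoB g rest (pvGoA g f n v l).2 (res ++ (pvGoA g f n v l).1))
    ∧ (∀ (ds : List String) (v : List String) (l : Int) (rest : List (String × Int)) (res : List (String × Int)),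
      (pvUc g v < f ∨ ds = []) →
      pvGoB g (ds.map (fun d => (d, l)) ++ rest) v res
        = pvGoB g rest (pvGoAList g f ds v l).2 (res ++ (pvGoAList g f ds v l).1)) := by
  intro f
  induction f with
  | zero =>
    constructor
    · intro n v l rest res hf; omega
    · intro ds v l rest res hf
      rcases hf with hf | rfl
      · omega
      · simp [pvGoAList]
  | succ f ih =>
    have hA : ∀ (n : String) (v : List String) (l : Int) (rest res : List (String × Int)),
        pvUc g v < f + 1 →
        pvGoB g ((n, l) :: rest) v res
          = pvGoB g rest (pvGoA g (f+1) n v l).2 (res ++ (pvGoA g (f+1) n v l).1) := by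
      intro n v l rest res hf
      by_cases hv : n ∈ v
      · simp [pvGoB, pvGoA, hv]
      · have hstep : pvGoB g ((n, l) :: rest) v res
            = pvGoB g ((PySem.Dict.getD (PySem.Dict.mk g) n []).map (fun d => (d, l + 1)) ++ rest)
                (PySem.Set.add v n) (res ++ [(n, l)]) := by
          rw [pvGoB]
          simp only [hv, dite_false]
          rw [pvRevPush]
        have hcond : pvUc g (PySem.Set.add v n) < f
            ∨ PySem.Dict.getD (PySem.Dict.mk g) n [] = [] := by
          by_cases hd : PySem.Dict.getD (PySem.Dict.mk g) n [] = []
          · exact Or.inr hd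
          · left
            have hmem := pvKey_of_getD_ne_nil g n hd
            rw [pvAdd_not_mem v n hv]
            have := pvUc_lt_of_mem g v n hmem hv
            omega
        have hL := ih.2 (PySem.Dict.getD (PySem.Dict.mk g) n []) (PySem.Set.add v n) (l + 1)
          rest (res ++ [(n, l)]) hcond
        rw [hstep, hL]
        simp only [pvGoA, hv, if_false]
        simp
    refine ⟨hA, ?_⟩
    intro ds
    induction ds with
    | nil =>
      intro v l rest res _
      simp [pvGoAList]
    | cons d ds ihds =>
      intro v l rest res hf
      have hf' : pvUc g v < f + 1 := by
        rcases hf with hf | hf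
        · exact hf
        · exact absurd hf (by simp)
      have h1 := hA d v l (ds.map (fun d => (d, l)) ++ rest) res hf'
      have hpre := (pvGoA_prefix g (f+1)).1 d v l
      have h2 := ihds ((pvGoA g (f+1) d v l).2) l rest (res ++ (pvGoA g (f+1) d v l).1)
        (Or.inl (lt_of_le_of_lt (pvUc_prefix_le g hpre) hf'))
      simp only [List.map_cons, List.cons_append] at *
      rw [h1, h2]
      simp only [pvGoAList]
      simp

-- ===== VERDICT (by name: the statement is the Claim_ definition above) =====
theorem gather_deps_spec : Claim_equal_gather_deps := by
  intro start_file graph visited level _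
  suffices h : ∀ v0 : List String,
      (pvGoA graph ((pvAllNodes graph).length + 1) start_file v0 level).1
        = pvGoB graph [(start_file, level)] v0 [] by
    cases visited <;> simpa [Spec_gather_deps, gather_deps, gather_deps_alt] using h _
  intro v0
  have hf : pvUc graph v0 < (pvAllNodes graph).length + 1 :=
    Nat.lt_succ_of_le (List.length_filter_le _ _)
  have h := (pvMain graph ((pvAllNodes graph).length + 1)).1 start_file v0 level [] [] hf
  rw [h]
  simp [pvGoB]
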